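-- pv_equiv track=rewrite | github.com/aberdichevskaia/catalytic-sites-annotation | prediction_results_analysis/legacy/stratified_results2.py | get_catalytic_class
-- ===== SOURCE A (Python) =====
-- from typing import Dict, Any, List, Optional, Tuple
--
-- def get_catalytic_class(residues: List[str]) -> int:
--     if any(r in residues for r in "ILMVWF"):
--         return 0
--     if any(r in residues for r in "AGP"):
--         return 1
--     if any(r in residues for r in "QN"):
--         return 2
--     if any(r in residues for r in "KR"):
--         return 3
--     if any(r == "S" for r in residues):
--         return 4
--     if any(r == "T" for r in residues):
--         return 5
--     if any(r in residues for r in "DE"):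
--         return 6
--     return 7
-- ===== SOURCE B (Python) =====
-- CLASSES = {"I": 0, "L": 0, "M": 0, "V": 0, "W": 0, "F": 0,
--            "A": 1, "G": 1, "P": 1,
--            "Q": 2, "N": 2,
--            "K": 3, "R": 3,
--            "S": 4,
--            "T": 5,
--            "D": 6, "E": 6}
--
-- def get_catalytic_class(residues):
--     best = 7
--     for r in residues:
--         best = min(best, CLASSES.get(r, 7))
--     return best
-- ===== Notes on version B (the rewrite author's own statement) =====
-- stated objective: simpler
-- what changed: Replaces seven sequential membership scans over the residue list by one pass that takes the minimum class index via a letter-to-class dictionary.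
import Mathlib
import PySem

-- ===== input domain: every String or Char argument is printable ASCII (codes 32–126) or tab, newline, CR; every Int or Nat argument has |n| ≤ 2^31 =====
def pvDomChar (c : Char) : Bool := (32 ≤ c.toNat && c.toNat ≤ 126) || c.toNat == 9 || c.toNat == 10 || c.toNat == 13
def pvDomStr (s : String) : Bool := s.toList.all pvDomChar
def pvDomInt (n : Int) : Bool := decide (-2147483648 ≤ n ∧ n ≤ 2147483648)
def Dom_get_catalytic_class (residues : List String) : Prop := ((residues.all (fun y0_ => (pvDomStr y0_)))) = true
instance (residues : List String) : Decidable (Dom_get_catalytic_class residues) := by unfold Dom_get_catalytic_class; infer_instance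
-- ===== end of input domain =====

-- B replaces A's seven sequential membership scans by a single min-pass over a letter-to-class dictionary (simpler: one traversal).


-- ===== PORT A =====
def get_catalytic_class (residues : List String) : Int :=
  if "I" ∈ residues ∨ "L" ∈ residues ∨ "M" ∈ residues ∨ "V" ∈ residues ∨ "W" ∈ residues ∨ "F" ∈ residues then 0
  else if "A" ∈ residues ∨ "G" ∈ residues ∨ "P" ∈ residues then 1
  else if "Q" ∈ residues ∨ "N" ∈ residues then 2
  else if "K" ∈ residues ∨ "R" ∈ residues then 3
  else if "S" ∈ residues then 4
  else if "T" ∈ residues then 5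
  else if "D" ∈ residues ∨ "E" ∈ residues then 6
  else 7

-- ===== PORT B =====
-- the module-level dict literal CLASSES of Source B
def pvCLASSES : PySem.Dict String Int :=
  PySem.Dict.ofList [("I", 0), ("L", 0), ("M", 0), ("V", 0), ("W", 0), ("F", 0), ("A", 1), ("G", 1), ("P", 1), ("Q", 2), ("N", 2), ("K", 3), ("R", 3), ("S", 4), ("T", 5), ("D", 6), ("E", 6)]

def get_catalytic_class_alt (residues : List String) : Int :=
  residues.foldl (fun best r => min best (pvCLASSES.getD r 7)) 7

-- ===== PRECONDITION & SPEC =====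
def Spec_get_catalytic_class (residues : List String) (out : Int) : Prop := out = get_catalytic_class_alt residues
instance (residues : List String) (out : Int) : Decidable (Spec_get_catalytic_class residues out) := by unfold Spec_get_catalytic_class; infer_instance

-- ===== CLAIM (what is proved, stated in full; the proofs are below) =====
def Claim_equal_get_catalytic_class : Prop := ∀ (residues : List String), Dom_get_catalytic_class residues → Spec_get_catalytic_class residues (get_catalytic_class residues)

-- ===== LEMMAS AND PROOFS =====

-- A's result is always in [0, 7]
theorem getA_le_seven (l : List String) : get_catalytic_class l ≤ 7 := by
  unfold get_catalytic_class; split_ifs <;> norm_num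

-- the CLASSES dict lookup, written out as an if-chain over the 17 letters
theorem classes_getD (r : String) :
    pvCLASSES.getD r 7 =
      if r = "I" ∨ r = "L" ∨ r = "M" ∨ r = "V" ∨ r = "W" ∨ r = "F" then 0
      else if r = "A" ∨ r = "G" ∨ r = "P" then 1
      else if r = "Q" ∨ r = "N" then 2
      else if r = "K" ∨ r = "R" then 3
      else if r = "S" then 4
      else if r = "T" then 5
      else if r = "D" ∨ r = "E" then 6
      else 7 := by
  have e : pvCLASSES = PySem.Dict.mk [("I", 0), ("L", 0), ("M", 0), ("V", 0), ("W", 0), ("F", 0), ("A", 1), ("G", 1), ("P", 1), ("Q", 2), ("N", 2), ("K", 3), ("R", 3), ("S", 4), ("T", 5), ("D", 6), ("E", 6)] := by decide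
  rw [e, PySem.Dict.getD_eq_get?_getD]
  by_cases h0 : r = "I"
  · subst h0; decide
  by_cases h1 : r = "L"
  · subst h1; decide
  by_cases h2 : r = "M"
  · subst h2; decide
  by_cases h3 : r = "V"
  · subst h3; decide
  by_cases h4 : r = "W"
  · subst h4; decide
  by_cases h5 : r = "F"
  · subst h5; decide
  by_cases h6 : r = "A"
  · subst h6; decide
  by_cases h7 : r = "G"
  · subst h7; decide
  by_cases h8 : r = "P"
  · subst h8; decide
  by_cases h9 : r = "Q"
  · subst h9; decide
  by_cases h10 : r = "N"
  · subst h10; decide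
  by_cases h11 : r = "K"
  · subst h11; decide
  by_cases h12 : r = "R"
  · subst h12; decide
  by_cases h13 : r = "S"
  · subst h13; decide
  by_cases h14 : r = "T"
  · subst h14; decide
  by_cases h15 : r = "D"
  · subst h15; decide
  by_cases h16 : r = "E"
  · subst h16; decide
  have hn : (PySem.Dict.mk [("I", 0), ("L", 0), ("M", 0), ("V", 0), ("W", 0), ("F", 0), ("A", 1), ("G", 1), ("P", 1), ("Q", 2), ("N", 2), ("K", 3), ("R", 3), ("S", 4), ("T", 5), ("D", 6), ("E", 6)] : PySem.Dict String Int).get? r = none := by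
    simp only [PySem.Dict.get?_mk_cons, beq_iff_eq]
    rw [if_neg (fun h => h0 h.symm), if_neg (fun h => h1 h.symm), if_neg (fun h => h2 h.symm), if_neg (fun h => h3 h.symm), if_neg (fun h => h4 h.symm), if_neg (fun h => h5 h.symm), if_neg (fun h => h6 h.symm), if_neg (fun h => h7 h.symm), if_neg (fun h => h8 h.symm), if_neg (fun h => h9 h.symm), if_neg (fun h => h10 h.symm), if_neg (fun h => h11 h.symm), if_neg (fun h => h12 h.symm), if_neg (fun h => h13 h.symm), if_neg (fun h => h14 h.symm), if_neg (fun h => h15 h.symm), if_neg (fun h => h16 h.symm)]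
    rfl
  rw [hn]
  simp [h0, h1, h2, h3, h4, h5, h6, h7, h8, h9, h10, h11, h12, h13, h14, h15, h16]

-- A on a cons is the min of the head's class and A on the tail
set_option maxHeartbeats 1000000 in
theorem getA_cons (r : String) (l : List String) :
    get_catalytic_class (r :: l) = min (pvCLASSES.getD r 7) (get_catalytic_class l) := by
  rw [classes_getD]
  by_cases g0 : r = "I" ∨ r = "L" ∨ r = "M" ∨ r = "V" ∨ r = "W" ∨ r = "F"
  · rw [if_pos g0]
    rcases g0 with h | h | h | h | h | h <;> subst h <;>
      (unfold get_catalytic_class; simp only [List.mem_cons, String.reduceEq, false_or, true_or, or_true, or_false, if_true]; split_ifs <;> omega)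
  rw [if_neg g0]
  by_cases g1 : r = "A" ∨ r = "G" ∨ r = "P"
  · rw [if_pos g1]
    rcases g1 with h | h | h <;> subst h <;>
      (unfold get_catalytic_class; simp only [List.mem_cons, String.reduceEq, false_or, true_or, or_true, or_false, if_true]; split_ifs <;> omega)
  rw [if_neg g1]
  by_cases g2 : r = "Q" ∨ r = "N"
  · rw [if_pos g2]
    rcases g2 with h | h <;> subst h <;>
      (unfold get_catalytic_class; simp only [List.mem_cons, String.reduceEq, false_or, true_or, or_true, or_false, if_true]; split_ifs <;> omega)
  rw [if_neg g2]
  by_cases g3 : r = "K" ∨ r = "R"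
  · rw [if_pos g3]
    rcases g3 with h | h <;> subst h <;>
      (unfold get_catalytic_class; simp only [List.mem_cons, String.reduceEq, false_or, true_or, or_true, or_false, if_true]; split_ifs <;> omega)
  rw [if_neg g3]
  by_cases g4 : r = "S"
  · rw [if_pos g4]
    subst g4
    (unfold get_catalytic_class; simp only [List.mem_cons, String.reduceEq, false_or, true_or, or_true, or_false, if_true]; split_ifs <;> omega)
  rw [if_neg g4]
  by_cases g5 : r = "T"
  · rw [if_pos g5]
    subst g5
    (unfold get_catalytic_class; simp only [List.mem_cons, String.reduceEq, false_or, true_or, or_true, or_false, if_true]; split_ifs <;> omega)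
  rw [if_neg g5]
  by_cases g6 : r = "D" ∨ r = "E"
  · rw [if_pos g6]
    rcases g6 with h | h <;> subst h <;>
      (unfold get_catalytic_class; simp only [List.mem_cons, String.reduceEq, false_or, true_or, or_true, or_false, if_true]; split_ifs <;> omega)
  rw [if_neg g6]
  push_neg at g0 g1 g2 g3 g4 g5 g6
  obtain ⟨n0, n1, n2, n3, n4, n5⟩ := g0
  obtain ⟨n6, n7, n8⟩ := g1
  obtain ⟨n9, n10⟩ := g2
  obtain ⟨n11, n12⟩ := g3
  have n13 := g4
  have n14 := g5
  obtain ⟨n15, n16⟩ := g6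
  unfold get_catalytic_class
  simp only [List.mem_cons, show ("I" = r) ↔ False from ⟨fun h => n0 h.symm, False.elim⟩, show ("L" = r) ↔ False from ⟨fun h => n1 h.symm, False.elim⟩, show ("M" = r) ↔ False from ⟨fun h => n2 h.symm, False.elim⟩, show ("V" = r) ↔ False from ⟨fun h => n3 h.symm, False.elim⟩, show ("W" = r) ↔ False from ⟨fun h => n4 h.symm, False.elim⟩, show ("F" = r) ↔ False from ⟨fun h => n5 h.symm, False.elim⟩, show ("A" = r) ↔ False from ⟨fun h => n6 h.symm, False.elim⟩, show ("G" = r) ↔ False from ⟨fun h => n7 h.symm, False.elim⟩, show ("P" = r) ↔ False from ⟨fun h => n8 h.symm, False.elim⟩, show ("Q" = r) ↔ False from ⟨fun h => n9 h.symm, False.elim⟩, show ("N" = r) ↔ False from ⟨fun h => n10 h.symm, False.elim⟩, show ("K" = r) ↔ False from ⟨fun h => n11 h.symm, False.elim⟩, show ("R" = r) ↔ False from ⟨fun h => n12 h.symm, False.elim⟩, show ("S" = r) ↔ False from ⟨fun h => n13 h.symm, False.elim⟩, show ("T" = r) ↔ False from ⟨fun h => n14 h.symm, False.elim⟩, show ("D"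 = r) ↔ False from ⟨fun h => n15 h.symm, False.elim⟩, show ("E" = r) ↔ False from ⟨fun h => n16 h.symm, False.elim⟩, false_or]
  split_ifs <;> omega

-- B's fold, started at any b ≤ 7, computes min b (A l)
theorem fold_min (l : List String) (b : Int) (hb : b ≤ 7) :
    l.foldl (fun best r => min best (pvCLASSES.getD r 7)) b = min b (get_catalytic_class l) := by
  induction l generalizing b with
  | nil =>
      simp [get_catalytic_class]
      omega
  | cons r l ih =>
      have h1 : min b (pvCLASSES.getD r 7) ≤ 7 := le_trans (min_le_left _ _) hb
      simp only [List.foldl_cons, ih _ h1, getA_cons]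
      rw [min_assoc]

-- ===== VERDICT (by name: the statement is the Claim_ definition above) =====
theorem get_catalytic_class_spec : Claim_equal_get_catalytic_class := by
  intro residues _
  unfold Spec_get_catalytic_class get_catalytic_class_alt
  rw [fold_min residues 7 le_rfl]
  have := getA_le_seven residues
  omega
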